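-- pv_equiv track=rewrite | github.com/alexmunoz502/advent-of-code | 2023/09/part_2.py | reduce_totals
-- ===== SOURCE A (Python) =====
-- def reduce_totals(totals: list[int]) -> int:
--     i = len(totals) - 2
--     value = totals[-1]
--     while i >= 0:
--         n = totals[i]
--         value = n - value
--         i -= 1
--     return value
-- ===== SOURCE B (Python) =====
-- def reduce_totals(totals: list[int]) -> int:
--     result = totals[0]
--     sign = -1
--     for v in totals[1:]:
--         result += sign * v
--         sign = -sign
--     return result
-- ===== Notes on version B (the rewrite author's own statement) =====
-- stated objective: alternative
-- what changed: Replaces A's back-to-front nested-subtraction loop (value = n - value from the end) with a single forward pass accumulating the alternating signed sum (result += sign*v, sign flipping each step).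
import Mathlib
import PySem

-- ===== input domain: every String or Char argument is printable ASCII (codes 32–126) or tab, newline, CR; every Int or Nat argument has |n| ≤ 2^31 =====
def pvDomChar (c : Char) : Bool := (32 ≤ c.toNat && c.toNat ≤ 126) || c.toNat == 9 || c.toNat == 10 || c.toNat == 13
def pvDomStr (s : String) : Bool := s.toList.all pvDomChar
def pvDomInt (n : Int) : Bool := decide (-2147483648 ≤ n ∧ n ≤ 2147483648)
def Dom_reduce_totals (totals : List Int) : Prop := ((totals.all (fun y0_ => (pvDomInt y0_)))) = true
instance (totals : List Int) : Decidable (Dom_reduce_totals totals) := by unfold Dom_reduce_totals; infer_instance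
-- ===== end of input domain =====

-- B replaces A's back-to-front nested subtraction with a forward pass over a signed running sum (alternative decomposition, same O(n) cost).


-- ===== PORT A =====
-- while i >= 0: n = totals[i]; value = n - value; i -= 1   (i counts down; transliterated as recursion on the Nat index)
def reduce_totals_loop (totals : List Int) : Nat → Int → Int
  | 0, value => (PySem.List.pyGetD totals ((0 : Nat) : Int) 0) - value
  | (j+1), value => reduce_totals_loop totals j ((PySem.List.pyGetD totals (((j+1 : Nat)) : Int) 0) - value)

def reduce_totals (totals : List Int) : Int :=
  let value := PySem.List.pyGetD totals (-1) 0      -- totals[-1]; in range under Pre_ (totals ≠ [])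
  if 2 ≤ totals.length then reduce_totals_loop totals (totals.length - 2) value else value

-- ===== PORT B =====
def reduce_totals_alt (totals : List Int) : Int :=
  let result := PySem.List.pyGetD totals 0 0        -- totals[0]; in range under Pre_ (totals ≠ [])
  let p := (PySem.List.slice totals (some 1) none).foldl
      (fun (rs : Int × Int) v => (rs.1 + rs.2 * v, -rs.2)) (result, (-1 : Int))
  p.1

-- ===== PRECONDITION & SPEC =====
-- Pre_ excludes only the empty list, on which Python A raises IndexError at totals[-1] (and B at totals[0]).
def Pre_reduce_totals (totals : List Int) : Prop := totals ≠ []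
instance (totals : List Int) : Decidable (Pre_reduce_totals totals) := by unfold Pre_reduce_totals; infer_instance
def pvWitness_reduce_totals : List Int := [3, 1, 4]

def Spec_reduce_totals (totals : List Int) (out : Int) : Prop := out = reduce_totals_alt totals
instance (totals : List Int) (out : Int) : Decidable (Spec_reduce_totals totals out) := by unfold Spec_reduce_totals; infer_instance

-- ===== CLAIM (what is proved, stated in full; the proofs are below) =====
def Claim_equal_reduce_totals : Prop := ∀ (totals : List Int), Dom_reduce_totals totals → Pre_reduce_totals totals → Spec_reduce_totals totals (reduce_totals totals)

-- ===== LEMMAS AND PROOFS =====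

/-- The alternating sum a₀ - a₁ + a₂ - … written as the recursion a - altsum t. -/
def pvAltsum : List Int → Int
  | [] => 0
  | a :: t => a - pvAltsum t

/-- Nested-subtraction fold: g [a₀,…,aᵢ] v = a₀ - (a₁ - (… - (aᵢ - v))). -/
def pvNest : List Int → Int → Int
  | [], v => v
  | a :: t, v => a - pvNest t v

theorem pvNest_append_singleton (l : List Int) (a v : Int) :
    pvNest (l ++ [a]) v = pvNest l (a - v) := by
  induction l with
  | nil => simp [pvNest]
  | cons x t ih => simp [pvNest, ih]

theorem pvNest_zero (l : List Int) : pvNest l 0 = pvAltsum l := by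
  induction l with
  | nil => rfl
  | cons a t ih => simp [pvNest, pvAltsum, ih]

theorem pvLoop_eq_nest (totals : List Int) (i : Nat) (v : Int) (h : i + 1 ≤ totals.length) :
    reduce_totals_loop totals i v = pvNest (totals.take (i+1)) v := by
  induction i generalizing v with
  | zero =>
    obtain ⟨a, t, rfl⟩ : ∃ a t, totals = a :: t := by
      cases totals with
      | nil => simp at h
      | cons a t => exact ⟨a, t, rfl⟩
    simp [reduce_totals_loop, pvNest]
  | succ j ih =>
    have hj1 : j + 1 < totals.length := by omega
    have htake : totals.take (j+2) = totals.take (j+1) ++ [totals[j+1]] := by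
      rw [List.take_add_one]
      simp [List.getElem?_eq_getElem hj1]
    rw [reduce_totals_loop, ih _ (by omega), htake, pvNest_append_singleton]
    congr 1
    rw [PySem.List.pyGetD_natCast]
    simp [List.getD, List.getElem?_eq_getElem hj1]

theorem reduce_totals_eq_altsum (totals : List Int) (h : totals ≠ []) :
    reduce_totals totals = pvAltsum totals := by
  unfold reduce_totals
  rw [← pvNest_zero]
  have hlast : PySem.List.pyGetD totals (-1) 0 = totals.getLast h :=
    PySem.List.pyGetD_neg_one totals 0 h
  by_cases h2 : 2 ≤ totals.length
  · simp only [if_pos h2, hlast]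
    obtain ⟨l, a, rfl⟩ : ∃ l a, totals = l ++ [a] := by
      rcases List.eq_nil_or_concat totals with h0 | ⟨l, a, hc⟩
      · exact absurd h0 h
      · exact ⟨l, a, by simp [hc]⟩
    have hl : 1 ≤ l.length := by simp at h2 ⊢; omega
    have hlen : (l ++ [a]).length - 2 + 1 = l.length := by simp; omega
    rw [pvLoop_eq_nest _ _ _ (by simp), hlen]
    rw [List.take_left' rfl, List.getLast_append_singleton (l := l)]
    rw [pvNest_append_singleton]
    ring_nf
  · simp only [if_neg h2, hlast]
    obtain ⟨a, t, rfl⟩ : ∃ a t, totals = a :: t := by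
      cases totals with
      | nil => exact absurd rfl h
      | cons a t => exact ⟨a, t, rfl⟩
    have : t = [] := by
      cases t with
      | nil => rfl
      | cons b u => simp at h2
    subst this
    simp [List.getLast, pvNest]

theorem pvFold_alt (l : List Int) (r s : Int) :
    (l.foldl (fun (rs : Int × Int) v => (rs.1 + rs.2 * v, -rs.2)) (r, s)).1
      = r + s * pvAltsum l := by
  induction l generalizing r s with
  | nil => simp [pvAltsum]
  | cons a t ih => simp [List.foldl, pvAltsum, ih]; ring

theorem reduce_totals_alt_eq_altsum (totals : List Int) (h : totals ≠ []) :
    reduce_totals_alt totals = pvAltsum totals := by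
  obtain ⟨a, t, rfl⟩ : ∃ a t, totals = a :: t := by
    cases totals with
    | nil => exact absurd rfl h
    | cons a t => exact ⟨a, t, rfl⟩
  unfold reduce_totals_alt
  have hslice : PySem.List.slice (a :: t) (some 1) none = t := by
    simp [PySem.List.slice_from]
  rw [hslice]
  simp only [pvFold_alt]
  simp [pvAltsum, PySem.List.pyGetD_zero_cons]
  ring

-- ===== VERDICT (by name: the statement is the Claim_ definition above) =====
theorem reduce_totals_spec : Claim_equal_reduce_totals := by
  intro totals _ hpre
  unfold Spec_reduce_totals
  rw [reduce_totals_eq_altsum totals hpre, reduce_totals_alt_eq_altsum totals hpre]
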